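-- pv_equiv track=rewrite | github.com/Vineyardcode/voynich_slop | scripts/phase97_slot_grammar_hchar.py | parse_one_chunk_with_slots
-- ===== SOURCE A (Python) =====
-- SLOT1 = {'ch', 'sh', 'y'}
--
-- SLOT2_RUNS = {'e'}
--
-- SLOT2_SINGLE = {'q', 'a'}
--
-- SLOT3 = {'o'}
--
-- SLOT4_RUNS = {'i'}
--
-- SLOT4_SINGLE = {'d'}
--
-- SLOT5 = {'y', 'p', 'f', 'k', 'l', 'r', 's', 't',
--          'cth', 'ckh', 'cph', 'cfh', 'n', 'm'}
--
-- def parse_one_chunk_with_slots(glyphs, pos):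
--     """Parse one chunk, returning (glyph_list, slot_assignments, new_pos).
--     slot_assignments is a list of (glyph, slot_number) pairs.
--     """
--     start = pos
--     result = []
--
--     # SLOT 1: onset
--     if pos < len(glyphs) and glyphs[pos] in SLOT1:
--         result.append((glyphs[pos], 1)); pos += 1
--
--     # SLOT 2: front vowel
--     if pos < len(glyphs):
--         if glyphs[pos] in SLOT2_RUNS:
--             count = 0
--             while pos < len(glyphs) and glyphs[pos] in SLOT2_RUNS and count < 3:
--                 result.append((glyphs[pos], 2)); pos += 1; count += 1
--         elif glyphs[pos] in SLOT2_SINGLE: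
--             result.append((glyphs[pos], 2)); pos += 1
--
--     # SLOT 3: core 'o'
--     if pos < len(glyphs) and glyphs[pos] in SLOT3:
--         result.append((glyphs[pos], 3)); pos += 1
--
--     # SLOT 4: back vowel
--     if pos < len(glyphs):
--         if glyphs[pos] in SLOT4_RUNS:
--             count = 0
--             while pos < len(glyphs) and glyphs[pos] in SLOT4_RUNS and count < 3:
--                 result.append((glyphs[pos], 4)); pos += 1; count += 1
--         elif glyphs[pos] in SLOT4_SINGLE:
--             result.append((glyphs[pos], 4)); pos += 1
--
--     # SLOT 5: coda
--     if pos < len(glyphs) and glyphs[pos] in SLOT5: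
--         result.append((glyphs[pos], 5)); pos += 1
--
--     if pos == start:
--         return None, None, pos
--     return [g for g, s in result], result, pos
-- ===== SOURCE B (Python) =====
-- SLOT1 = {'ch', 'sh', 'y'}
-- SLOT2_RUNS = {'e'}
-- SLOT2_SINGLE = {'q', 'a'}
-- SLOT3 = {'o'}
-- SLOT4_RUNS = {'i'}
-- SLOT4_SINGLE = {'d'}
-- SLOT5 = {'y', 'p', 'f', 'k', 'l', 'r', 's', 't',
--          'cth', 'ckh', 'cph', 'cfh', 'n', 'm'}
--
-- _MEMBERS = {1: SLOT1, 2: SLOT2_RUNS | SLOT2_SINGLE, 3: SLOT3,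
--             4: SLOT4_RUNS | SLOT4_SINGLE, 5: SLOT5}
-- _RUNS = {2: 'e', 4: 'i'}
--
-- def parse_one_chunk_with_slots(glyphs, pos):
--     """Glyph-driven state machine: walk the glyph sequence once, assigning each
--     glyph to the least still-admissible slot, with an in-progress capped run."""
--     start, n = pos, len(glyphs)
--     result = []
--     min_slot, run_slot, run_len = 1, None, 0
--     while pos < n:
--         g = glyphs[pos]
--         if run_slot is not None and g == _RUNS[run_slot] and run_len < 3:
--             result.append((g, run_slot)); pos += 1; run_len += 1
--             continue
--         s = next((s for s in range(min_slot, 6) if g in _MEMBERS[s]), None)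
--         if s is None:
--             break
--         result.append((g, s)); pos += 1
--         min_slot = s + 1
--         if _RUNS.get(s) == g:
--             run_slot, run_len = s, 1
--         else:
--             run_slot, run_len = None, 0
--     if pos == start:
--         return None, None, pos
--     return [g for g, _ in result], result, pos
-- ===== Notes on version B (the rewrite author's own statement) =====
-- stated objective: alternative
-- what changed: Replaces A's five hand-written sequential slot blocks by a single glyph-driven state-machine loop over the input: each glyph is assigned to the least still-admissible slot (tracking a minimum-slot bound and an in-progress capped run), so control is driven by glyphs, not by slots.
-- outside the precondition, e.g. on parse_one_chunk_with_slots(['ch', 'e'], -5): A raises IndexError, B raises IndexError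
import Mathlib
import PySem

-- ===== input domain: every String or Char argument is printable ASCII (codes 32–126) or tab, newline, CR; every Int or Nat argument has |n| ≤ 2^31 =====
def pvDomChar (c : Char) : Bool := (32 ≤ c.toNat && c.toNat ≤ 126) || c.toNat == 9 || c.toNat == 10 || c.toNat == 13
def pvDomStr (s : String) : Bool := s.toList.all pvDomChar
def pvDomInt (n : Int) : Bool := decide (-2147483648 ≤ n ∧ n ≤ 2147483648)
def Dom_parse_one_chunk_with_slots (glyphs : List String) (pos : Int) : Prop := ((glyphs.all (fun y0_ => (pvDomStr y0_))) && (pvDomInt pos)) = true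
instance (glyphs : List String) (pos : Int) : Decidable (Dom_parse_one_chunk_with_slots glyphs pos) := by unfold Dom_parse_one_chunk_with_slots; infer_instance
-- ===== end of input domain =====

-- B replaces A's five hand-written sequential slot blocks by a single glyph-driven
-- state-machine loop (least still-admissible slot per glyph, with a capped-run state);
-- objective: alternative decomposition, same cost.

-- ===== PORT A =====
def SLOT1 : List String := ["ch", "sh", "y"]
def SLOT2_RUNS : List String := ["e"]
def SLOT2_SINGLE : List String := ["q", "a"]
def SLOT3 : List String := ["o"]
def SLOT4_RUNS : List String := ["i"]
def SLOT4_SINGLE : List String := ["d"]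
def SLOT5 : List String := ["y", "p", "f", "k", "l", "r", "s", "t",
                            "cth", "ckh", "cph", "cfh", "n", "m"]

-- glyphs[i] (Python indexing; "" stands for the IndexError case, excluded by Pre_)
def pyAt (glyphs : List String) (i : Int) : String := (PySem.List.pyGet? glyphs i).getD ""

-- the inner 'while pos < len(glyphs) and glyphs[pos] in RUNS and count < 3' loop of A
def runLoopA (runs : List String) (slot : Int) (glyphs : List String)
    (pos count : Int) (result : List (String × Int)) : Int × List (String × Int) :=
  if h : pos < (glyphs.length : Int) ∧ runs.contains (pyAt glyphs pos) ∧ count < 3 then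
    runLoopA runs slot glyphs (pos + 1) (count + 1) (result ++ [(pyAt glyphs pos, slot)])
  else (pos, result)
termination_by (3 - count).toNat
decreasing_by have := h.2.2; omega

-- one 'if pos < len(glyphs) and glyphs[pos] in S: append; pos += 1' block of A
def slotSingleA (s : List String) (slot : Int) (glyphs : List String)
    (st : Int × List (String × Int)) : Int × List (String × Int) :=
  if st.1 < (glyphs.length : Int) ∧ s.contains (pyAt glyphs st.1) then
    (st.1 + 1, st.2 ++ [(pyAt glyphs st.1, slot)])
  else st

-- one run/single block of A (slots 2 and 4)
def slotRunA (runs singles : List String) (slot : Int) (glyphs : List String)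
    (st : Int × List (String × Int)) : Int × List (String × Int) :=
  if st.1 < (glyphs.length : Int) then
    if runs.contains (pyAt glyphs st.1) then
      runLoopA runs slot glyphs st.1 0 st.2
    else if singles.contains (pyAt glyphs st.1) then
      (st.1 + 1, st.2 ++ [(pyAt glyphs st.1, slot)])
    else st
  else st

def parse_one_chunk_with_slots (glyphs : List String) (pos : Int) :
    Option (List String) × (Option (List (String × Int))) × Int :=
  let start := pos
  let st : Int × List (String × Int) := (pos, [])
  let st := slotSingleA SLOT1 1 glyphs st
  let st := slotRunA SLOT2_RUNS SLOT2_SINGLE 2 glyphs st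
  let st := slotSingleA SLOT3 3 glyphs st
  let st := slotRunA SLOT4_RUNS SLOT4_SINGLE 4 glyphs st
  let st := slotSingleA SLOT5 5 glyphs st
  if st.1 = start then (none, none, st.1)
  else (some (st.2.map Prod.fst), some st.2, st.1)

-- ===== PORT B =====
-- _MEMBERS[s]: the glyphs admissible in slot s
def pvMembers (s : Int) : List String :=
  if s = 1 then SLOT1
  else if s = 2 then SLOT2_RUNS ++ SLOT2_SINGLE
  else if s = 3 then SLOT3
  else if s = 4 then SLOT4_RUNS ++ SLOT4_SINGLE
  else SLOT5

-- _RUNS.get(s): the run glyph of slot s, if any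
def pvRunGlyph (s : Int) : Option String :=
  if s = 2 then some "e" else if s = 4 then some "i" else none

-- B's 'while pos < n' state-machine loop: state = (min_slot, run_slot, run_len)
def loopB (glyphs : List String) (n : Int) (pos minSlot : Int) (runSlot : Option Int)
    (runLen : Int) (result : List (String × Int)) : Int × List (String × Int) :=
  if hlt : pos < n then
    let g := pyAt glyphs pos
    if (runSlot.any fun rs => pvRunGlyph rs == some g) = true ∧ runLen < 3 then
      loopB glyphs n (pos + 1) minSlot runSlot (runLen + 1)
        (result ++ [(g, runSlot.getD 0)])
    else
      match (PySem.List.pyRange minSlot 6 1).find? (fun s => (pvMembers s).contains g) with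
      | none => (pos, result)
      | some s =>
        loopB glyphs n (pos + 1) (s + 1)
          (if pvRunGlyph s = some g then some s else none)
          (if pvRunGlyph s = some g then 1 else 0)
          (result ++ [(g, s)])
  else (pos, result)
termination_by (n - pos).toNat
decreasing_by all_goals omega

def parse_one_chunk_with_slots_alt (glyphs : List String) (pos : Int) :
    Option (List String) × (Option (List (String × Int))) × Int :=
  let start := pos
  let n : Int := glyphs.length
  let st := loopB glyphs n pos 1 none 0 []
  if st.1 = start then (none, none, st.1)
  else (some (st.2.map Prod.fst), some st.2, st.1)

-- ===== PRECONDITION & SPEC =====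
-- Pre_ excludes pos < -len(glyphs) with pos < len(glyphs), where Python A (and B) raise IndexError.
def Pre_parse_one_chunk_with_slots (glyphs : List String) (pos : Int) : Prop :=
  -(glyphs.length : Int) ≤ pos
instance (glyphs : List String) (pos : Int) : Decidable (Pre_parse_one_chunk_with_slots glyphs pos) := by
  unfold Pre_parse_one_chunk_with_slots; infer_instance

def pvWitness_parse_one_chunk_with_slots : List String × Int := (["ch", "e", "e", "o", "d", "n"], 0)

def Spec_parse_one_chunk_with_slots (glyphs : List String) (pos : Int)
    (out : Option (List String) × (Option (List (String × Int))) × Int) : Prop :=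
  out = parse_one_chunk_with_slots_alt glyphs pos
instance (glyphs : List String) (pos : Int) (out : Option (List String) × (Option (List (String × Int))) × Int) : Decidable (Spec_parse_one_chunk_with_slots glyphs pos out) := by
  unfold Spec_parse_one_chunk_with_slots; infer_instance

-- ===== CLAIM (what is proved, stated in full; the proofs are below) =====
def Claim_equal_parse_one_chunk_with_slots : Prop := ∀ (glyphs : List String) (pos : Int), Dom_parse_one_chunk_with_slots glyphs pos → Pre_parse_one_chunk_with_slots glyphs pos → Spec_parse_one_chunk_with_slots glyphs pos (parse_one_chunk_with_slots glyphs pos)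

-- ===== LEMMAS AND PROOFS =====

theorem loopB_six (glyphs : List String) (pos : Int) (res : List (String × Int)) :
    loopB glyphs (glyphs.length : Int) pos 6 none 0 res = (pos, res) := by
  rw [loopB]
  split
  · have : PySem.List.pyRange 6 6 1 = ([] : List Int) := by decide
    simp [this]
  · rfl

theorem loopB_five (glyphs : List String) (pos : Int) (res : List (String × Int)) :
    loopB glyphs (glyphs.length : Int) pos 5 none 0 res =
      slotSingleA SLOT5 5 glyphs (pos, res) := by
  rw [loopB]
  have hr : PySem.List.pyRange 5 6 1 = ([5] : List Int) := by decide
  split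
  · next h =>
    by_cases hm : pyAt glyphs pos ∈ SLOT5
    · simp [hr, hm, pvMembers, pvRunGlyph, loopB_six, slotSingleA, h,
        show ¬((5:Int) = 2) by decide, show ¬((5:Int) = 4) by decide]
    · simp [hr, hm, pvMembers, slotSingleA, h,
        show ¬((5:Int) = 2) by decide, show ¬((5:Int) = 4) by decide]
  · next h => simp [slotSingleA, h]

-- run state of slot 4: the loop equals A's run loop followed by the slot-5 block
theorem loopB_run4 (glyphs : List String) :
    ∀ (k : Nat) (c pos : Int) (res : List (String × Int)), (3 - c).toNat = k →
    loopB glyphs (glyphs.length : Int) pos 5 (some 4) c res =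
      slotSingleA SLOT5 5 glyphs (runLoopA SLOT4_RUNS 4 glyphs pos c res) := by
  intro k
  induction k with
  | zero =>
    intro c pos res hk
    have hc : ¬ c < 3 := by omega
    rw [runLoopA, dif_neg (fun h => hc h.2.2)]
    rw [loopB]
    split
    · next h =>
      rw [if_neg (fun hcon => hc hcon.2)]
      by_cases hm : pyAt glyphs pos ∈ SLOT5
      · simp [show PySem.List.pyRange 5 6 1 = ([5] : List Int) by decide,
          hm, pvMembers, pvRunGlyph, loopB_six, slotSingleA, h,
          show ¬((5:Int) = 2) by decide, show ¬((5:Int) = 4) by decide]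
      · simp [show PySem.List.pyRange 5 6 1 = ([5] : List Int) by decide,
          hm, pvMembers, slotSingleA, h,
          show ¬((5:Int) = 2) by decide, show ¬((5:Int) = 4) by decide]
    · next h => simp [slotSingleA, h]
  | succ k ih =>
    intro c pos res hk
    have hc : c < 3 := by omega
    by_cases hp : pos < (glyphs.length : Int)
    · by_cases hg : SLOT4_RUNS.contains (pyAt glyphs pos)
      · have hgy : pyAt glyphs pos = "i" := by
          simpa [SLOT4_RUNS] using hg
        rw [runLoopA, dif_pos ⟨hp, hg, hc⟩]
        rw [loopB, dif_pos hp]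
        rw [if_pos (by simp [pvRunGlyph, hgy, hc])]
        simp only [Option.getD]
        exact ih (c + 1) (pos + 1) (res ++ [(pyAt glyphs pos, 4)]) (by omega)
      · have hgy : ¬ pvRunGlyph 4 = some (pyAt glyphs pos) := by
          simp only [pvRunGlyph]
          intro h
          apply hg
          simp only [show ¬((4:Int) = 2) by decide, if_neg, if_pos,
            reduceIte, Option.some.injEq] at h
          simp [SLOT4_RUNS, h.symm]
        rw [runLoopA, dif_neg (fun h => hg h.2.1)]
        rw [loopB, dif_pos hp]
        rw [if_neg (by
          intro hcon
          apply hgy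
          simpa [Option.any] using hcon.1)]
        by_cases hm : pyAt glyphs pos ∈ SLOT5
        · simp [show PySem.List.pyRange 5 6 1 = ([5] : List Int) by decide,
            hm, pvMembers, pvRunGlyph, loopB_six, slotSingleA, hp,
            show ¬((5:Int) = 2) by decide, show ¬((5:Int) = 4) by decide]
        · simp [show PySem.List.pyRange 5 6 1 = ([5] : List Int) by decide,
            hm, pvMembers, slotSingleA, hp,
            show ¬((5:Int) = 2) by decide, show ¬((5:Int) = 4) by decide]
    · rw [runLoopA, dif_neg (fun h => hp h.1)]
      rw [loopB, dif_neg hp]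
      simp [slotSingleA, hp]

theorem loopB_forget (glyphs : List String) (m rs c pos : Int) (res : List (String × Int))
    (h : ¬ ((pvRunGlyph rs == some (pyAt glyphs pos)) = true ∧ c < 3)) :
    loopB glyphs (glyphs.length : Int) pos m (some rs) c res =
      loopB glyphs (glyphs.length : Int) pos m none 0 res := by
  rw [loopB, loopB]
  split
  · rw [if_neg (by simpa [Option.any] using h), if_neg (by simp [Option.any])]
  · rfl

theorem loopB_skip (glyphs : List String) (m pos : Int) (res : List (String × Int))
    (hm : m < 6) (h : (pvMembers m).contains (pyAt glyphs pos) = false) :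
    loopB glyphs (glyphs.length : Int) pos m none 0 res =
      loopB glyphs (glyphs.length : Int) pos (m + 1) none 0 res := by
  rw [loopB, loopB]
  split
  · simp [PySem.List.pyRange_one_cons hm, List.find?_cons, show pyAt glyphs pos ∉ pvMembers m by simpa using h, Option.any]
  · rfl

theorem slotSingleA_take (s : List String) (slot : Int) (glyphs : List String)
    (st : Int × List (String × Int)) (h1 : st.1 < (glyphs.length : Int))
    (h2 : s.contains (pyAt glyphs st.1) = true) :
    slotSingleA s slot glyphs st = (st.1 + 1, st.2 ++ [(pyAt glyphs st.1, slot)]) := by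
  rw [slotSingleA, if_pos ⟨h1, h2⟩]

theorem slotSingleA_skip (s : List String) (slot : Int) (glyphs : List String)
    (st : Int × List (String × Int))
    (h : s.contains (pyAt glyphs st.1) = false) :
    slotSingleA s slot glyphs st = st := by
  rw [slotSingleA, if_neg (fun hc => absurd hc.2 (by simpa using h))]

theorem slotRunA_run (runs singles : List String) (slot : Int) (glyphs : List String)
    (st : Int × List (String × Int)) (h1 : st.1 < (glyphs.length : Int))
    (h2 : runs.contains (pyAt glyphs st.1) = true) :
    slotRunA runs singles slot glyphs st = runLoopA runs slot glyphs st.1 0 st.2 := by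
  rw [slotRunA, if_pos h1, if_pos h2]

theorem slotRunA_single (runs singles : List String) (slot : Int) (glyphs : List String)
    (st : Int × List (String × Int)) (h1 : st.1 < (glyphs.length : Int))
    (h2 : runs.contains (pyAt glyphs st.1) = false)
    (h3 : singles.contains (pyAt glyphs st.1) = true) :
    slotRunA runs singles slot glyphs st = (st.1 + 1, st.2 ++ [(pyAt glyphs st.1, slot)]) := by
  rw [slotRunA, if_pos h1, if_neg (by rw [h2]; simp), if_pos h3]

theorem slotRunA_skip (runs singles : List String) (slot : Int) (glyphs : List String)
    (st : Int × List (String × Int))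
    (h1 : runs.contains (pyAt glyphs st.1) = false)
    (h2 : singles.contains (pyAt glyphs st.1) = false) :
    slotRunA runs singles slot glyphs st = st := by
  rw [slotRunA]
  split_ifs with hL hR hS
  · exact absurd hR (by simpa using h1)
  · exact absurd hS (by simpa using h2)
  · rfl
  · rfl

theorem runLoopA_step (runs : List String) (slot : Int) (glyphs : List String)
    (pos count : Int) (res : List (String × Int))
    (h : pos < (glyphs.length : Int) ∧ runs.contains (pyAt glyphs pos) = true ∧ count < 3) :
    runLoopA runs slot glyphs pos count res =
      runLoopA runs slot glyphs (pos + 1) (count + 1) (res ++ [(pyAt glyphs pos, slot)]) := by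
  rw [runLoopA, dif_pos h]

theorem loopB_four (glyphs : List String) (pos : Int) (res : List (String × Int)) :
    loopB glyphs (glyphs.length : Int) pos 4 none 0 res =
      slotSingleA SLOT5 5 glyphs
        (slotRunA SLOT4_RUNS SLOT4_SINGLE 4 glyphs (pos, res)) := by
  by_cases hp : pos < (glyphs.length : Int)
  · by_cases hmem : (pvMembers 4).contains (pyAt glyphs pos)
    · have hid : pyAt glyphs pos = "i" ∨ pyAt glyphs pos = "d" := by
        simpa [pvMembers, SLOT4_RUNS, SLOT4_SINGLE] using hmem
      rw [loopB, dif_pos hp, if_neg (by simp [Option.any])]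
      rw [PySem.List.pyRange_one_cons (show (4:Int) < 6 by norm_num),
        List.find?_cons_of_pos (by simpa using hmem)]
      simp only []
      rcases hid with hg | hg
      · -- run glyph 'i'
        have hr : SLOT4_RUNS.contains (pyAt glyphs pos) = true := by simp [SLOT4_RUNS, hg]
        rw [slotRunA_run SLOT4_RUNS SLOT4_SINGLE 4 glyphs (pos, res) hp hr]
        rw [runLoopA_step SLOT4_RUNS 4 glyphs pos 0 res ⟨hp, hr, by norm_num⟩]
        rw [if_pos (by simp [pvRunGlyph, hg]), if_pos (by simp [pvRunGlyph, hg])]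
        rw [show (4:Int) + 1 = 5 by norm_num]
        rw [loopB_run4 glyphs 2 1 (pos + 1) (res ++ [(pyAt glyphs pos, 4)]) (by decide)]
        norm_num
      · -- single glyph 'd'
        have hr : SLOT4_RUNS.contains (pyAt glyphs pos) = false := by simp [SLOT4_RUNS, hg]
        rw [slotRunA_single SLOT4_RUNS SLOT4_SINGLE 4 glyphs (pos, res) hp hr
          (by simp [SLOT4_SINGLE, hg])]
        rw [if_neg (by simp [pvRunGlyph, hg])]
        rw [if_neg (by simp [pvRunGlyph, hg])]
        rw [show (4:Int) + 1 = 5 by norm_num, loopB_five]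
    · rw [loopB_skip glyphs 4 pos res (by norm_num) (by simpa using hmem)]
      rw [show (4:Int) + 1 = 5 by norm_num, loopB_five]
      have h1 : SLOT4_RUNS.contains (pyAt glyphs pos) = false := by
        revert hmem; simp [pvMembers, SLOT4_RUNS, SLOT4_SINGLE] <;> tauto
      have h2 : SLOT4_SINGLE.contains (pyAt glyphs pos) = false := by
        revert hmem; simp [pvMembers, SLOT4_RUNS, SLOT4_SINGLE] <;> tauto
      rw [slotRunA_skip SLOT4_RUNS SLOT4_SINGLE 4 glyphs (pos, res) h1 h2]
  · rw [loopB, dif_neg hp]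
    simp [slotRunA, slotSingleA, hp]

theorem loopB_three (glyphs : List String) (pos : Int) (res : List (String × Int)) :
    loopB glyphs (glyphs.length : Int) pos 3 none 0 res =
      slotSingleA SLOT5 5 glyphs
        (slotRunA SLOT4_RUNS SLOT4_SINGLE 4 glyphs
          (slotSingleA SLOT3 3 glyphs (pos, res))) := by
  by_cases hp : pos < (glyphs.length : Int)
  · by_cases hmem : (pvMembers 3).contains (pyAt glyphs pos)
    · rw [loopB, dif_pos hp, if_neg (by simp [Option.any])]
      rw [PySem.List.pyRange_one_cons (show (3:Int) < 6 by norm_num),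
        List.find?_cons_of_pos (by simpa using hmem)]
      simp only []
      rw [if_neg (by simp [pvRunGlyph]), if_neg (by simp [pvRunGlyph])]
      rw [show (3:Int) + 1 = 4 by norm_num, loopB_four]
      rw [slotSingleA_take SLOT3 3 glyphs (pos, res) hp (by simpa [pvMembers] using hmem)]
    · rw [loopB_skip glyphs 3 pos res (by norm_num) (by simpa using hmem)]
      rw [show (3:Int) + 1 = 4 by norm_num, loopB_four]
      rw [slotSingleA_skip SLOT3 3 glyphs (pos, res) (by simpa [pvMembers] using hmem)]
  · rw [loopB, dif_neg hp]
    simp [slotRunA, slotSingleA, hp]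

theorem loopB_run2 (glyphs : List String) :
    ∀ (k : Nat) (c pos : Int) (res : List (String × Int)), (3 - c).toNat = k →
    loopB glyphs (glyphs.length : Int) pos 3 (some 2) c res =
      slotSingleA SLOT5 5 glyphs
        (slotRunA SLOT4_RUNS SLOT4_SINGLE 4 glyphs
          (slotSingleA SLOT3 3 glyphs (runLoopA SLOT2_RUNS 2 glyphs pos c res))) := by
  intro k
  induction k with
  | zero =>
    intro c pos res hk
    have hc : ¬ c < 3 := by omega
    rw [runLoopA, dif_neg (fun h => hc h.2.2)]
    rw [loopB_forget glyphs 3 2 c pos res (fun h => hc h.2), loopB_three]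
  | succ k ih =>
    intro c pos res hk
    have hc : c < 3 := by omega
    by_cases hp : pos < (glyphs.length : Int)
    · by_cases hg : SLOT2_RUNS.contains (pyAt glyphs pos)
      · have hgy : pyAt glyphs pos = "e" := by simpa [SLOT2_RUNS] using hg
        rw [runLoopA, dif_pos ⟨hp, hg, hc⟩]
        rw [loopB, dif_pos hp, if_pos (by simp [pvRunGlyph, hgy, hc])]
        simp only [Option.getD]
        exact ih (c + 1) (pos + 1) (res ++ [(pyAt glyphs pos, 2)]) (by omega)
      · rw [runLoopA, dif_neg (fun h => hg h.2.1)]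
        rw [loopB_forget glyphs 3 2 c pos res (by
          intro hcon
          apply hg
          have h2 : pvRunGlyph 2 = some (pyAt glyphs pos) := by simpa using hcon.1
          simp only [pvRunGlyph, reduceIte, Option.some.injEq] at h2
          simp [SLOT2_RUNS, h2.symm])]
        rw [loopB_three]
    · rw [runLoopA, dif_neg (fun h => hp h.1)]
      rw [loopB, dif_neg hp]
      simp [slotRunA, slotSingleA, hp]

theorem loopB_two (glyphs : List String) (pos : Int) (res : List (String × Int)) :
    loopB glyphs (glyphs.length : Int) pos 2 none 0 res =
      slotSingleA SLOT5 5 glyphs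
        (slotRunA SLOT4_RUNS SLOT4_SINGLE 4 glyphs
          (slotSingleA SLOT3 3 glyphs
            (slotRunA SLOT2_RUNS SLOT2_SINGLE 2 glyphs (pos, res)))) := by
  by_cases hp : pos < (glyphs.length : Int)
  · by_cases hmem : (pvMembers 2).contains (pyAt glyphs pos)
    · have hid : pyAt glyphs pos = "e" ∨ pyAt glyphs pos = "q" ∨ pyAt glyphs pos = "a" := by
        simpa [pvMembers, SLOT2_RUNS, SLOT2_SINGLE] using hmem
      rw [loopB, dif_pos hp, if_neg (by simp [Option.any])]
      rw [PySem.List.pyRange_one_cons (show (2:Int) < 6 by norm_num),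
        List.find?_cons_of_pos (by simpa using hmem)]
      simp only []
      rcases hid with hg | hg
      · -- run glyph 'e'
        have hr : SLOT2_RUNS.contains (pyAt glyphs pos) = true := by simp [SLOT2_RUNS, hg]
        rw [slotRunA_run SLOT2_RUNS SLOT2_SINGLE 2 glyphs (pos, res) hp hr]
        rw [runLoopA_step SLOT2_RUNS 2 glyphs pos 0 res ⟨hp, hr, by norm_num⟩]
        rw [if_pos (by simp [pvRunGlyph, hg]), if_pos (by simp [pvRunGlyph, hg])]
        rw [show (2:Int) + 1 = 3 by norm_num]
        rw [loopB_run2 glyphs 2 1 (pos + 1) (res ++ [(pyAt glyphs pos, 2)]) (by decide)]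
        norm_num
      · -- single glyph 'q' or 'a'
        have hne : ¬ pyAt glyphs pos = "e" := by rcases hg with h | h <;> simp [h]
        have hr : SLOT2_RUNS.contains (pyAt glyphs pos) = false := by
          simp [SLOT2_RUNS]; exact hne
        rw [slotRunA_single SLOT2_RUNS SLOT2_SINGLE 2 glyphs (pos, res) hp hr
          (by rcases hg with h | h <;> simp [SLOT2_SINGLE, h])]
        rw [if_neg (by simp [pvRunGlyph]; intro h; exact hne h.symm)]
        rw [if_neg (by simp [pvRunGlyph]; intro h; exact hne h.symm)]
        rw [show (2:Int) + 1 = 3 by norm_num, loopB_three]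
    · rw [loopB_skip glyphs 2 pos res (by norm_num) (by simpa using hmem)]
      rw [show (2:Int) + 1 = 3 by norm_num, loopB_three]
      have h1 : SLOT2_RUNS.contains (pyAt glyphs pos) = false := by
        revert hmem; simp [pvMembers, SLOT2_RUNS, SLOT2_SINGLE] <;> tauto
      have h2 : SLOT2_SINGLE.contains (pyAt glyphs pos) = false := by
        revert hmem; simp [pvMembers, SLOT2_RUNS, SLOT2_SINGLE] <;> tauto
      rw [slotRunA_skip SLOT2_RUNS SLOT2_SINGLE 2 glyphs (pos, res) h1 h2]
  · rw [loopB, dif_neg hp]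
    simp [slotRunA, slotSingleA, hp]

theorem loopB_one (glyphs : List String) (pos : Int) (res : List (String × Int)) :
    loopB glyphs (glyphs.length : Int) pos 1 none 0 res =
      slotSingleA SLOT5 5 glyphs
        (slotRunA SLOT4_RUNS SLOT4_SINGLE 4 glyphs
          (slotSingleA SLOT3 3 glyphs
            (slotRunA SLOT2_RUNS SLOT2_SINGLE 2 glyphs
              (slotSingleA SLOT1 1 glyphs (pos, res))))) := by
  by_cases hp : pos < (glyphs.length : Int)
  · by_cases hmem : (pvMembers 1).contains (pyAt glyphs pos)
    · rw [loopB, dif_pos hp, if_neg (by simp [Option.any])]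
      rw [PySem.List.pyRange_one_cons (show (1:Int) < 6 by norm_num),
        List.find?_cons_of_pos (by simpa using hmem)]
      simp only []
      rw [if_neg (by simp [pvRunGlyph]), if_neg (by simp [pvRunGlyph])]
      rw [show (1:Int) + 1 = 2 by norm_num, loopB_two]
      rw [slotSingleA_take SLOT1 1 glyphs (pos, res) hp (by simpa [pvMembers] using hmem)]
    · rw [loopB_skip glyphs 1 pos res (by norm_num) (by simpa using hmem)]
      rw [show (1:Int) + 1 = 2 by norm_num, loopB_two]
      rw [slotSingleA_skip SLOT1 1 glyphs (pos, res) (by simpa [pvMembers] using hmem)]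
  · rw [loopB, dif_neg hp]
    simp [slotRunA, slotSingleA, hp]

-- ===== VERDICT (by name: the statement is the Claim_ definition above) =====
theorem parse_one_chunk_with_slots_spec : Claim_equal_parse_one_chunk_with_slots := by
  intro glyphs pos _ _
  simp only [Spec_parse_one_chunk_with_slots, parse_one_chunk_with_slots,
    parse_one_chunk_with_slots_alt]
  rw [loopB_one]
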